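-- pv_equiv track=rewrite | github.com/lin13k/practice | algo_problems/q21-40/q22.py | genParenthesisByNumbers
-- ===== SOURCE A (Python) =====
-- def genParenthesisByNumbers(nLt):
--     result = ''
--     for i in range(nLt[-1] + 1):
--         if i in nLt:
--             result += ')'
--         else:
--             result += '('
--     return result
-- ===== SOURCE B (Python) =====
-- def genParenthesisByNumbers(nLt):
--     n = nLt[-1]
--     buf = ['('] * (n + 1)
--     for idx in nLt:
--         if 0 <= idx <= n:
--             buf[idx] = ')'
--     return ''.join(buf)
-- ===== Notes on version B (the rewrite author's own statement) =====
-- stated objective: faster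
-- what changed: B allocates a '(' buffer whose length is one more than the list's last element and scatter-writes ')' at each in-range listed index, instead of scanning every candidate index with an O(len) membership test.
import Mathlib
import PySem

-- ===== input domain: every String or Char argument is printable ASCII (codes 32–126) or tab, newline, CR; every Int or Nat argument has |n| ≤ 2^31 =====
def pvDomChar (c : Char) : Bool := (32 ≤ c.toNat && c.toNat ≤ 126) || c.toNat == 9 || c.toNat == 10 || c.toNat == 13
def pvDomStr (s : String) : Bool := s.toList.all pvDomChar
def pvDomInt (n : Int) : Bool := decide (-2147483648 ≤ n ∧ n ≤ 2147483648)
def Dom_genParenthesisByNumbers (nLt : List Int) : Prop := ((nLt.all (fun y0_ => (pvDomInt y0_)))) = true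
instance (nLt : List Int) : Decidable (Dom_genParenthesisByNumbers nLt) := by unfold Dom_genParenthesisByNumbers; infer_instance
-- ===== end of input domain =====

-- B builds the result by scattering ')' into a pre-allocated '(' buffer instead of
-- scanning every candidate index with a membership test (objective: faster).
-- Pre_ excludes only the empty list, on which A raises IndexError reading the last element.

-- ===== PORT A =====
def genParenthesisByNumbers (nLt : List Int) : String :=
  match PySem.List.pyGet? nLt (-1) with
  | none => ""  -- unreachable under Pre_: Python raises IndexError here
  | some last =>
    String.mk ((PySem.List.pyRange 0 (last + 1) 1).foldl
      (fun acc i => acc ++ [if i ∈ nLt then ')' else '(']) [])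

-- ===== PORT B =====
def genParenthesisByNumbers_alt (nLt : List Int) : String :=
  match PySem.List.pyGet? nLt (-1) with
  | none => ""  -- unreachable under Pre_
  | some n =>
    String.mk (nLt.foldl
      (fun b idx => if 0 ≤ idx ∧ idx ≤ n then b.set idx.toNat ')' else b)
      (List.replicate (n + 1).toNat '('))

-- ===== PRECONDITION & SPEC =====
def Pre_genParenthesisByNumbers (nLt : List Int) : Prop := nLt ≠ []
instance (nLt : List Int) : Decidable (Pre_genParenthesisByNumbers nLt) := by
  unfold Pre_genParenthesisByNumbers; infer_instance
def pvWitness_genParenthesisByNumbers : List Int := ([1, 3])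

def Spec_genParenthesisByNumbers (nLt : List Int) (out : String) : Prop := out = genParenthesisByNumbers_alt nLt
instance (nLt : List Int) (out : String) : Decidable (Spec_genParenthesisByNumbers nLt out) := by unfold Spec_genParenthesisByNumbers; infer_instance

-- ===== CLAIM (what is proved, stated in full; the proofs are below) =====
def Claim_equal_genParenthesisByNumbers : Prop := ∀ (nLt : List Int), Dom_genParenthesisByNumbers nLt → Pre_genParenthesisByNumbers nLt → Spec_genParenthesisByNumbers nLt (genParenthesisByNumbers nLt)

-- ===== LEMMAS AND PROOFS =====

-- A's accumulator loop is a map.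
theorem pvFoldAppend (f : Int → Char) : ∀ (l : List Int) (acc : List Char),
    l.foldl (fun acc i => acc ++ [f i]) acc = acc ++ l.map f := by
  intro l
  induction l with
  | nil => simp
  | cons x xs ih => intro acc; simp [List.foldl_cons, ih]

-- B's scatter loop preserves the buffer length.
theorem pvFoldLen (n : Int) : ∀ (l : List Int) (b : List Char),
    (l.foldl (fun b idx => if 0 ≤ idx ∧ idx ≤ n then b.set idx.toNat ')' else b) b).length = b.length := by
  intro l
  induction l with
  | nil => intro b; rfl
  | cons x xs ih =>
    intro b
    simp only [List.foldl_cons]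
    rw [ih]
    by_cases hx : 0 ≤ x ∧ x ≤ n
    · simp [hx]
    · simp [hx]

-- Pointwise description of B's scatter loop (in-range positions).
theorem pvFoldSet (n : Int) : ∀ (l : List Int) (b : List Char) (j : Nat), j < b.length →
    (l.foldl (fun b idx => if 0 ≤ idx ∧ idx ≤ n then b.set idx.toNat ')' else b) b)[j]? =
      if (j : Int) ∈ l ∧ (j : Int) ≤ n then some ')' else b[j]? := by
  intro l
  induction l with
  | nil => intro b j hj; simp
  | cons x xs ih =>
    intro b j hj
    simp only [List.foldl_cons]
    by_cases hx : 0 ≤ x ∧ x ≤ n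
    · rw [if_pos hx, ih _ _ (by simpa using hj)]
      simp only [List.getElem?_set, List.mem_cons]
      split_ifs <;> first | rfl | tauto | (exfalso; omega) | (exfalso; tauto) |
        (exfalso; rcases ‹_ ∧ _› with ⟨h1, h2⟩; rcases h1 with h1 | h1 <;> first | omega | tauto)
    · rw [if_neg hx, ih _ _ hj]
      simp only [List.mem_cons]
      split_ifs <;> first | rfl | tauto | (exfalso; tauto) |
        (exfalso; rcases ‹_ ∧ _› with ⟨h1, h2⟩; rcases h1 with h1 | h1 <;> first | omega | tauto)

-- ===== VERDICT (by name: the statement is the Claim_ definition above) =====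
theorem genParenthesisByNumbers_spec : Claim_equal_genParenthesisByNumbers := by
  intro nLt _ hpre
  unfold Spec_genParenthesisByNumbers genParenthesisByNumbers genParenthesisByNumbers_alt
  cases hget : PySem.List.pyGet? nLt (-1) with
  | none => rfl
  | some n =>
    apply congrArg String.mk
    rw [pvFoldAppend (fun i => if i ∈ nLt then ')' else '('), List.nil_append]
    apply List.ext_getElem?
    intro j
    rw [PySem.List.pyRange_one, List.map_map]
    by_cases hj : j < (n + 1).toNat
    · rw [pvFoldSet n nLt _ j (by simpa using hj)]
      have hj2 : j < (n + 1 - 0).toNat := by omega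
      rw [List.getElem?_map, List.getElem?_range hj2]
      have hjn : (j : Int) ≤ n := by omega
      simp only [Option.map_some, Function.comp_apply, zero_add,
        List.getElem?_replicate, if_pos hj]
      by_cases hmem : (j : Int) ∈ nLt
      · rw [if_pos hmem, if_pos ⟨hmem, hjn⟩]
      · rw [if_neg hmem, if_neg (fun h => hmem h.1)]
    · have hlhs : (List.range (n + 1 - 0).toNat)[j]? = none :=
        List.getElem?_eq_none (by simp only [List.length_range]; omega)
      have hrhs : (nLt.foldl (fun b idx => if 0 ≤ idx ∧ idx ≤ n then b.set idx.toNat ')' else b)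
          (List.replicate (n + 1).toNat '('))[j]? = none := by
        apply List.getElem?_eq_none
        rw [pvFoldLen]
        simpa using Nat.le_of_not_lt hj
      rw [List.getElem?_map, hlhs, hrhs, Option.map_none]
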